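-- pv_equiv track=rewrite | github.com/Aser113344/Pr1 | Agent.py | route_model
-- ===== SOURCE A (Python) =====
-- from typing import Any, Dict, List, Optional, Tuple
--
-- MODEL_ROUTING = {
--     "coding":    "gpt-4o",
--     "reasoning": "gpt-4o",
--     "fast":      "gpt-4o-mini",
--     "testing":   "gpt-4o-mini",
--     "debug":     "gpt-4o",
--     "security":  "gpt-4o",
--     "default":   "gpt-4o-mini",
-- }
--
-- def route_model(agents: List[str]) -> str:
--     if any(a in ("DEBUG", "ARCHITECT", "SECURITY", "SCANNER") for a in agents):
--         return MODEL_ROUTING["reasoning"]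
--     if any(a in ("CODER", "REFACTOR") for a in agents):
--         return MODEL_ROUTING["coding"]
--     if "TEST" in agents:
--         return MODEL_ROUTING["testing"]
--     return MODEL_ROUTING["default"]
-- ===== SOURCE B (Python) =====
-- from typing import Any, Dict, List, Optional, Tuple
--
-- MODEL_ROUTING = {
--     "coding":    "gpt-4o",
--     "reasoning": "gpt-4o",
--     "fast":      "gpt-4o-mini",
--     "testing":   "gpt-4o-mini",
--     "debug":     "gpt-4o",
--     "security":  "gpt-4o",
--     "default":   "gpt-4o-mini",
-- }
--
-- _RANK = {
--     "DEBUG": 0, "ARCHITECT": 0, "SECURITY": 0, "SCANNER": 0,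
--     "CODER": 1, "REFACTOR": 1,
--     "TEST": 2,
-- }
--
-- _RANK_MODEL = {
--     0: MODEL_ROUTING["reasoning"],
--     1: MODEL_ROUTING["coding"],
--     2: MODEL_ROUTING["testing"],
--     3: MODEL_ROUTING["default"],
-- }
--
-- def route_model(agents: List[str]) -> str:
--     best = 3
--     for a in agents:
--         r = _RANK.get(a, 3)
--         if r < best:
--             best = r
--     return _RANK_MODEL[best]
-- ===== Notes on version B (the rewrite author's own statement) =====
-- stated objective: alternative
-- what changed: Replaced the three priority-ordered any() scans over the list by a single pass that looks each agent up in a token->rank dict, keeps the minimum rank seen, and maps the winning rank to its model through a rank->model table.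
import Mathlib
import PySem

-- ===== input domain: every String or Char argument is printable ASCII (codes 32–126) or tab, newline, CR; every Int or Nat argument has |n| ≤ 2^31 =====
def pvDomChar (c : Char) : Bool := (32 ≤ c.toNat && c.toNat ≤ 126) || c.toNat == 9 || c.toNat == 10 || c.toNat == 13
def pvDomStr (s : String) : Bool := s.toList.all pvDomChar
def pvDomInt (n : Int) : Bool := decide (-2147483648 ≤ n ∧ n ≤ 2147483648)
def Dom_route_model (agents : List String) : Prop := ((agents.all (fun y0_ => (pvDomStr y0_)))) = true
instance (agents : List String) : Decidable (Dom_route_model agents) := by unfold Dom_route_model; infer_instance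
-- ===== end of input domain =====

-- B replaces A's three priority-ordered any() scans by one pass keeping a minimum rank from a
-- token->rank dict, then maps the winning rank to its model (objective: alternative decomposition).

-- ===== PORT A =====
def MODEL_ROUTING : PySem.Dict String String := PySem.Dict.ofList
  [("coding", "gpt-4o"), ("reasoning", "gpt-4o"), ("fast", "gpt-4o-mini"),
   ("testing", "gpt-4o-mini"), ("debug", "gpt-4o"), ("security", "gpt-4o"),
   ("default", "gpt-4o-mini")]

-- MODEL_ROUTING["key"]: the keys used are always present, so the KeyError default is never reached
def route_model (agents : List String) : String :=
  if agents.any (fun a => (["DEBUG", "ARCHITECT", "SECURITY", "SCANNER"] : List String).contains a) then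
    (MODEL_ROUTING.get? "reasoning").getD ""
  else if agents.any (fun a => (["CODER", "REFACTOR"] : List String).contains a) then
    (MODEL_ROUTING.get? "coding").getD ""
  else if agents.contains "TEST" then
    (MODEL_ROUTING.get? "testing").getD ""
  else
    (MODEL_ROUTING.get? "default").getD ""

-- ===== PORT B =====
def rankDict : PySem.Dict String Int := PySem.Dict.ofList
  [("DEBUG", 0), ("ARCHITECT", 0), ("SECURITY", 0), ("SCANNER", 0),
   ("CODER", 1), ("REFACTOR", 1), ("TEST", 2)]

def rankModel : PySem.Dict Int String := PySem.Dict.ofList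
  [(0, (MODEL_ROUTING.get? "reasoning").getD ""), (1, (MODEL_ROUTING.get? "coding").getD ""),
   (2, (MODEL_ROUTING.get? "testing").getD ""), (3, (MODEL_ROUTING.get? "default").getD "")]

-- _RANK_MODEL[best]: best stays in {0,1,2,3}, so the KeyError default is never reached
def route_model_alt (agents : List String) : String :=
  let best := agents.foldl (fun best a => let r := rankDict.getD a 3; if r < best then r else best) 3
  (rankModel.get? best).getD ""

-- ===== PRECONDITION & SPEC =====
def Spec_route_model (agents : List String) (out : String) : Prop := out = route_model_alt agents
instance (agents : List String) (out : String) : Decidable (Spec_route_model agents out) := by unfold Spec_route_model; infer_instance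

-- ===== CLAIM (what is proved, stated in full; the proofs are below) =====
def Claim_equal_route_model : Prop := ∀ (agents : List String), Dom_route_model agents → Spec_route_model agents (route_model agents)

-- ===== LEMMAS AND PROOFS =====

-- the minimum rank of a list, recursively (proof-only helper characterising B's fold)
def rmin : List String → Int
  | [] => 3
  | a :: l => min (rankDict.getD a 3) (rmin l)

lemma rank_eval (a : String) : rankDict.getD a 3 =
    (if a = "DEBUG" then 0 else if a = "ARCHITECT" then 0 else if a = "SECURITY" then 0
     else if a = "SCANNER" then 0 else if a = "CODER" then 1 else if a = "REFACTOR" then 1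
     else if a = "TEST" then (2 : Int) else 3) := by
  simp only [rankDict, PySem.Dict.ofList, PySem.Dict.update]
  split_ifs <;> simp_all [PySem.Dict.getD_insert, PySem.Dict.getD_empty]

lemma rank_bounds (a : String) : 0 ≤ rankDict.getD a 3 ∧ rankDict.getD a 3 ≤ 3 := by
  rw [rank_eval a]; split_ifs <;> omega

lemma fold_eq_min (l : List String) (b : Int) (hb : b ≤ 3) :
    l.foldl (fun best a => let r := rankDict.getD a 3; if r < best then r else best) b
      = min b (rmin l) := by
  induction l generalizing b with
  | nil => simp [rmin]; omega
  | cons a l ih =>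
    have hr := rank_bounds a
    simp only [List.foldl_cons]
    rw [ih _ (by split_ifs <;> omega)]
    simp only [rmin]
    split_ifs <;> omega

set_option maxHeartbeats 2000000 in
lemma rmin_char (l : List String) : rmin l =
    (if l.any (fun a => (["DEBUG", "ARCHITECT", "SECURITY", "SCANNER"] : List String).contains a) then 0
     else if l.any (fun a => (["CODER", "REFACTOR"] : List String).contains a) then 1
     else if l.contains "TEST" then (2 : Int) else 3) := by
  induction l with
  | nil => simp [rmin]
  | cons a l ih =>
    simp only [rmin, ih, rank_eval a, List.any_cons, Bool.or_eq_true,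
      List.contains_eq_mem, decide_eq_true_eq, List.mem_cons,
      List.not_mem_nil, or_false]
    by_cases hA : (l.any fun a => decide (a = "DEBUG" ∨ a = "ARCHITECT" ∨ a = "SECURITY" ∨ a = "SCANNER")) = true <;>
    by_cases hB : (l.any fun a => decide (a = "CODER" ∨ a = "REFACTOR")) = true <;>
    by_cases hC : "TEST" ∈ l <;>
    simp only [hA, hB, hC, or_false, or_true, if_true, if_false] <;>
    split_ifs <;> first | omega | tauto

-- ===== VERDICT (by name: the statement is the Claim_ definition above) =====
theorem route_model_spec : Claim_equal_route_model := by
  intro agents _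
  unfold Spec_route_model route_model route_model_alt
  rw [fold_eq_min _ _ (by omega), rmin_char]
  split_ifs <;> decide
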